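-- pv_equiv track=rewrite | github.com/Metamess/AdventOfCode | 2023/days/day14.py | tilt_and_rotate
-- ===== SOURCE A (Python) =====
-- def tilt_and_rotate(platform: list[list[str]]) -> list[list[str]]:
--     new_platform = []
--     for i in range(len(platform[0])):
--         section_start = len(platform)
--         rock_count = 0
--         new_row = []
--         for j in reversed(range(len(platform))):
--             char = platform[j][i]
--             if char == ".":
--                 continue
--             if char == "O":
--                 rock_count += 1
--                 continue
--             # char == #
--             empty_length = section_start - (j + 1) - rock_count
--             new_row.extend(["."] * empty_length)
--             new_row.extend(["O"] * rock_count)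
--             new_row.append("#")
--             section_start = j
--             rock_count = 0
--         empty_length = section_start - rock_count
--         new_row.extend(["."] * empty_length)
--         new_row.extend(["O"] * rock_count)
--         assert len(new_row) == len(platform)
--         new_platform.append(new_row)
--
--     return new_platform
-- ===== SOURCE B (Python) =====
-- def _flush(seg):
--     k = seg.count("O")
--     return ["O"] * k + ["."] * (len(seg) - k)
--
--
-- def _tilt_column(col):
--     new_col = []
--     seg = []
--     for ch in col:
--         if ch == "." or ch == "O":
--             seg.append(ch)
--         else:
--             new_col += _flush(seg) + ["#"]
--             seg = []
--     return new_col + _flush(seg)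
--
--
-- def tilt_and_rotate(platform: list[list[str]]) -> list[list[str]]:
--     n = len(platform)
--     cols = [_tilt_column([platform[j][i] for j in range(n)])
--             for i in range(len(platform[0]))]
--     return [list(reversed(col)) for col in cols]
-- ===== Notes on version B (the rewrite author's own statement) =====
-- stated objective: alternative
-- what changed: A fuses tilting and rotation in one bottom-up index-arithmetic scan per column (tracking section_start/rock_count against row indices); B first tilts each column north with a forward scan that buffers each '#'-delimited segment and flushes its rocks to the front, then rotates clockwise by reversing each tilted column.
import Mathlib
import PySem

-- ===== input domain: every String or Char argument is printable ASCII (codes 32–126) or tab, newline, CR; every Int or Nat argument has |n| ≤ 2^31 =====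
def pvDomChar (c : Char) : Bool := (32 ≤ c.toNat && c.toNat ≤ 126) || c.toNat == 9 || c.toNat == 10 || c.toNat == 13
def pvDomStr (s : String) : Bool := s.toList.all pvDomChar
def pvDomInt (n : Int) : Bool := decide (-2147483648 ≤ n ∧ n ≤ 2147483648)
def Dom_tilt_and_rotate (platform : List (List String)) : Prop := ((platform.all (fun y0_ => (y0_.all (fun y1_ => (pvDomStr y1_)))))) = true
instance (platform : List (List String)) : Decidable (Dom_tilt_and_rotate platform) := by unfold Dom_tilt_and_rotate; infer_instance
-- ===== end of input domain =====

-- B replaces A's fused bottom-up per-column scan with index arithmetic by two phases —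
-- tilt each column north with a forward segment-buffer scan, then rotate clockwise by
-- reversing each tilted column — a different decomposition of the same O(R*C) task.


-- ===== PORT A =====
-- loop body of A's inner `for j in reversed(range(len(platform)))`; state = (section_start, rock_count, new_row)
def pvStepA (get : Nat → String) (s : Int × Int × List String) (j : Nat) : Int × Int × List String :=
  let char := get j
  if char = "." then s
  else if char = "O" then (s.1, s.2.1 + 1, s.2.2)
  else
    let empty_length := s.1 - ((j : Int) + 1) - s.2.1
    ((j : Int), 0, s.2.2 ++ List.replicate empty_length.toNat "." ++ List.replicate s.2.1.toNat "O" ++ ["#"])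

def tilt_and_rotate (platform : List (List String)) : List (List String) :=
  (List.range (((PySem.List.pyGet? platform 0).getD []).length)).foldl (fun new_platform i =>
    let st := ((List.range platform.length).reverse).foldl
      (pvStepA (fun j => (PySem.List.pyGet? ((PySem.List.pyGet? platform (j : Int)).getD []) (i : Int)).getD ""))
      ((platform.length : Int), 0, [])
    new_platform ++
      [st.2.2 ++ List.replicate (st.1 - st.2.1).toNat "." ++ List.replicate st.2.1.toNat "O"]) []

-- ===== PORT B =====
def pvFlush (seg : List String) : List String :=
  List.replicate (seg.count "O") "O" ++ List.replicate (seg.length - seg.count "O") "."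

-- loop body of B's `for ch in col`; state = (new_col, seg)
def pvStepB (s : List String × List String) (ch : String) : List String × List String :=
  if ch = "." ∨ ch = "O" then (s.1, s.2 ++ [ch])
  else (s.1 ++ pvFlush s.2 ++ ["#"], [])

def pvTiltCol (col : List String) : List String :=
  let s := col.foldl pvStepB ([], [])
  s.1 ++ pvFlush s.2

def tilt_and_rotate_alt (platform : List (List String)) : List (List String) :=
  let cols := (List.range (((PySem.List.pyGet? platform 0).getD []).length)).map (fun i =>
    pvTiltCol ((List.range platform.length).map (fun j =>
      (PySem.List.pyGet? ((PySem.List.pyGet? platform (j : Int)).getD []) (i : Int)).getD "")))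
  cols.map List.reverse

-- ===== PRECONDITION & SPEC =====
-- Pre_ = exactly the inputs where Python A returns: A raises IndexError on an empty platform
-- (platform[0]) and on any row shorter than the first row (platform[j][i]).
def Pre_tilt_and_rotate (platform : List (List String)) : Prop :=
  platform ≠ [] ∧ ∀ row ∈ platform, platform.headI.length ≤ row.length
instance (platform : List (List String)) : Decidable (Pre_tilt_and_rotate platform) := by
  unfold Pre_tilt_and_rotate; infer_instance
def pvWitness_tilt_and_rotate : List (List String) :=
  [["O", ".", "#"], [".", "O", "."], ["#", ".", "O"]]

def Spec_tilt_and_rotate (platform : List (List String)) (out : List (List String)) : Prop := out = tilt_and_rotate_alt platform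
instance (platform : List (List String)) (out : List (List String)) : Decidable (Spec_tilt_and_rotate platform out) := by unfold Spec_tilt_and_rotate; infer_instance

-- ===== CLAIM (what is proved, stated in full; the proofs are below) =====
def Claim_equal_tilt_and_rotate : Prop := ∀ (platform : List (List String)), Dom_tilt_and_rotate platform → Pre_tilt_and_rotate platform → Spec_tilt_and_rotate platform (tilt_and_rotate platform)

-- ===== LEMMAS AND PROOFS =====

-- A's reversed-range fold as structural recursion on the upper index
def pvFA (get : Nat → String) : Nat → (Int × Int × List String) → Int × Int × List String
  | 0, s => s
  | m + 1, s => pvFA get m (pvStepA get s m)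

theorem pvFA_eq_foldl (get : Nat → String) (m : Nat) (s : Int × Int × List String) :
    ((List.range m).reverse).foldl (pvStepA get) s = pvFA get m s := by
  induction m generalizing s with
  | zero => rfl
  | succ m ih =>
    rw [List.range_succ, List.reverse_append]
    simpa using ih (pvStepA get s m)

-- A's final flush after the inner loop
def pvFinal (s : Int × Int × List String) : List String :=
  s.2.2 ++ List.replicate (s.1 - s.2.1).toNat "." ++ List.replicate s.2.1.toNat "O"

-- B's fold leaves the accumulator alone on a blocker-free suffix, buffering it into seg
theorem pvStepB_clean (ws : List String) (h : ∀ x ∈ ws, x = "." ∨ x = "O")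
    (nc seg : List String) :
    ws.foldl pvStepB (nc, seg) = (nc, seg ++ ws) := by
  induction ws generalizing seg with
  | nil => simp
  | cons c ws ih =>
    have hc := h c (by simp)
    have hws : ∀ x ∈ ws, x = "." ∨ x = "O" := fun x hx => h x (by simp [hx])
    simp only [List.foldl_cons, pvStepB, hc, if_pos]
    rw [ih hws]
    simp

theorem pvTiltCol_clean (ws : List String) (h : ∀ x ∈ ws, x = "." ∨ x = "O") :
    pvTiltCol ws = pvFlush ws := by
  unfold pvTiltCol
  rw [show ws.foldl pvStepB ([], []) = (([] : List String), [] ++ ws) from pvStepB_clean ws h [] []]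
  simp

theorem pvTiltCol_block (xs : List String) (c : String) (hc : ¬(c = "." ∨ c = "O"))
    (ws : List String) (h : ∀ x ∈ ws, x = "." ∨ x = "O") :
    pvTiltCol (xs ++ c :: ws) = pvTiltCol xs ++ "#" :: pvFlush ws := by
  unfold pvTiltCol
  rw [List.foldl_append, List.foldl_cons]
  simp only [pvStepB, hc, if_false]
  rw [show ws.foldl pvStepB ((xs.foldl pvStepB ([], [])).1 ++ pvFlush (xs.foldl pvStepB ([], [])).2 ++ ["#"], []) = _ from pvStepB_clean ws h _ []]
  simp

theorem pvFlush_reverse (seg : List String) :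
    (pvFlush seg).reverse =
      List.replicate (seg.length - seg.count "O") "." ++ List.replicate (seg.count "O") "O" := by
  simp [pvFlush]

-- main invariant: A's bottom-up scan of the first m cells, with a clean pending segment
-- `seg` of the cells just below them already summarized in the state, finalizes to
-- acc ++ reverse of B's tilt of (those m cells ++ seg)
theorem pvMain (get : Nat → String) (m : Nat) (seg : List String)
    (h : ∀ x ∈ seg, x = "." ∨ x = "O") (acc : List String) :
    pvFinal (pvFA get m (((m + seg.length : Nat) : Int), ((seg.count "O" : Nat) : Int), acc)) =
      acc ++ (pvTiltCol ((List.range m).map get ++ seg)).reverse := by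
  induction m generalizing seg acc with
  | zero =>
    have hle : seg.count "O" ≤ seg.length := List.count_le_length
    simp only [pvFA, pvFinal, List.range_zero, List.map_nil, List.nil_append]
    rw [pvTiltCol_clean seg h, pvFlush_reverse]
    have h1 : (((0 + seg.length : Nat) : Int) - ((seg.count "O" : Nat) : Int)).toNat
        = seg.length - seg.count "O" := by omega
    have h2 : (((seg.count "O" : Nat) : Int)).toNat = seg.count "O" := by omega
    rw [h1, h2, List.append_assoc]
  | succ m ih =>
    simp only [pvFA]
    by_cases hdot : get m = "."
    · have hstep : pvStepA get (((m + 1 + seg.length : Nat) : Int), ((seg.count "O" : Nat) : Int), acc) m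
          = (((m + (get m :: seg).length : Nat) : Int), (((get m :: seg).count "O" : Nat) : Int), acc) := by
        simp [pvStepA, hdot]
        all_goals omega
      rw [hstep, ih (get m :: seg) (by intro x hx
                                       rcases List.mem_cons.mp hx with h1 | h1
                                       · exact Or.inl (h1 ▸ hdot)
                                       · exact h x h1) acc]
      rw [List.range_succ, List.map_append]
      simp
    · by_cases hO : get m = "O"
      · have hstep : pvStepA get (((m + 1 + seg.length : Nat) : Int), ((seg.count "O" : Nat) : Int), acc) m
            = (((m + (get m :: seg).length : Nat) : Int), (((get m :: seg).count "O" : Nat) : Int), acc) := by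
          simp [pvStepA, hO]
          all_goals omega
        rw [hstep, ih (get m :: seg) (by intro x hx
                                         rcases List.mem_cons.mp hx with h1 | h1
                                         · exact Or.inr (h1 ▸ hO)
                                         · exact h x h1) acc]
        rw [List.range_succ, List.map_append]
        simp
      · -- blocker
        have hle : seg.count "O" ≤ seg.length := List.count_le_length
        have hstep : pvStepA get (((m + 1 + seg.length : Nat) : Int), ((seg.count "O" : Nat) : Int), acc) m
            = (((m + ([] : List String).length : Nat) : Int), ((([] : List String).count "O" : Nat) : Int),
               acc ++ List.replicate (seg.length - seg.count "O") "." ++ List.replicate (seg.count "O") "O" ++ ["#"]) := by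
          simp only [pvStepA, hdot, hO, if_false]
          refine Prod.ext (by simp) (Prod.ext (by simp) ?_)
          simp only []
          have e1 : (((m + 1 + seg.length : Nat) : Int) - ((m : Int) + 1) - ((seg.count "O" : Nat) : Int)).toNat
              = seg.length - seg.count "O" := by omega
          have e2 : (((seg.count "O" : Nat) : Int)).toNat = seg.count "O" := by omega
          rw [e1, e2]
        rw [hstep, ih [] (by simp) _]
        rw [List.range_succ, List.map_append]
        simp only [List.map_cons, List.map_nil, List.append_nil, List.append_assoc,
          List.singleton_append]
        rw [pvTiltCol_block ((List.range m).map get) (get m) (by tauto) seg h]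
        simp [pvFlush_reverse, List.reverse_append]

-- per-column equality: A's fused scan-and-flush = reverse of B's tilted column
theorem pvCol (get : Nat → String) (n : Nat) :
    pvFinal (((List.range n).reverse).foldl (pvStepA get) ((n : Int), 0, [])) =
      (pvTiltCol ((List.range n).map get)).reverse := by
  rw [pvFA_eq_foldl]
  have := pvMain get n [] (by simp) []
  simpa using this

-- ===== VERDICT (by name: the statement is the Claim_ definition above) =====
theorem tilt_and_rotate_spec : Claim_equal_tilt_and_rotate := by
  intro platform _ _
  unfold Spec_tilt_and_rotate tilt_and_rotate tilt_and_rotate_alt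
  rw [List.map_map]
  rw [PySem.List.foldl_append_singleton_eq_map]
  refine List.map_congr_left (fun i _ => ?_)
  show pvFinal (((List.range platform.length).reverse).foldl
      (pvStepA (fun j => (PySem.List.pyGet? ((PySem.List.pyGet? platform (j : Int)).getD [])
        (i : Int)).getD "")) ((platform.length : Int), 0, [])) = _
  rw [pvCol]
  simp
  rw [show List.flatMap (fun (a : Nat) => ([((a : Nat) : Int)] : List Int)) (List.range platform.length) = (List.range platform.length).map (fun (a : Nat) => ((a : Nat) : Int)) from (List.map_eq_flatMap).symm]
  rw [List.map_map]
  simp [Function.comp_def]
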